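-- pv_equiv track=rewrite | github.com/AlyciaBHZ/autoforge | autoforge/engine/symbolic_compute.py | _handle_special_functions
-- ===== SOURCE A (Python) =====
-- def _handle_special_functions(latex: str) -> str:
--     """Handle special mathematical functions."""
--     functions = {
--         r"\arcsin": "asin",
--         r"\arccos": "acos",
--         r"\arctan": "atan",
--         r"\sinh": "sinh",
--         r"\cosh": "cosh",
--         r"\tanh": "tanh",
--     }
--     result = latex
--     for latex_fn, sympy_fn in functions.items():
--         result = result.replace(latex_fn, sympy_fn)
--     return result
-- ===== SOURCE B (Python) =====
-- def _handle_special_functions(latex: str) -> str: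
--     """Handle special mathematical functions (single left-to-right scan)."""
--     pairs = [(r"\arcsin", "asin"), (r"\arccos", "acos"), (r"\arctan", "atan"),
--              (r"\sinh", "sinh"), (r"\cosh", "cosh"), (r"\tanh", "tanh")]
--     pieces = []
--     i = 0
--     n = len(latex)
--     while i < n:
--         for latex_fn, sympy_fn in pairs:
--             if latex.startswith(latex_fn, i):
--                 pieces.append(sympy_fn)
--                 i += len(latex_fn)
--                 break
--         else:
--             pieces.append(latex[i])
--             i += 1
--     return "".join(pieces)
-- ===== Notes on version B (the rewrite author's own statement) =====
-- stated objective: alternative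
-- what changed: Replaces six sequential full-string str.replace passes by a single left-to-right scan that, at each position, emits the sympy name of the first LaTeX key matching there (valid because every key starts with a backslash, no key is a prefix of another, and no replacement re-creates a key).
import Mathlib
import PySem

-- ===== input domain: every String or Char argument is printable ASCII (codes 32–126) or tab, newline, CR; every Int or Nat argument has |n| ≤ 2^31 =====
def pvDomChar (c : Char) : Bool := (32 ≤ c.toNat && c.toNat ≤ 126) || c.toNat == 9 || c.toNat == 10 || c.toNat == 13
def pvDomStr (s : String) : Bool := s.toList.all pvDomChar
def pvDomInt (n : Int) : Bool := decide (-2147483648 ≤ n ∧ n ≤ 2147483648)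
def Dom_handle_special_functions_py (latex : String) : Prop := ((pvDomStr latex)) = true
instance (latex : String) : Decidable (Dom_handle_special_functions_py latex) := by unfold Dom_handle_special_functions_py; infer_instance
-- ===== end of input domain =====

-- B replaces A's six sequential full-string str.replace passes by one left-to-right scan that, at
-- each position, emits the sympy name of the first matching LaTeX key (return value equivalence).

-- ===== PORT A =====
def pyFunctions : List (String × String) :=
  [("\\arcsin", "asin"), ("\\arccos", "acos"), ("\\arctan", "atan"),
   ("\\sinh", "sinh"), ("\\cosh", "cosh"), ("\\tanh", "tanh")]

def handle_special_functions_py (latex : String) : String :=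
  pyFunctions.foldl (fun result p => PySem.Str.replace result p.1 p.2) latex

-- ===== PORT B =====
-- the inner `for … else` of Source B: first key of `ks` matching at the current position,
-- returning its replacement together with the rest of the input after the key
def bFirstMatch (ks : List (List Char × List Char)) (l : List Char) :
    Option (List Char × List Char) :=
  match ks with
  | [] => none
  | (k, v) :: rest =>
      if k ≠ [] ∧ k.isPrefixOf l then some (v, l.drop k.length) else bFirstMatch rest l
-- (the `k ≠ []` conjunct is a totality guard for bScan; every key of bKeys is nonempty)

theorem bFirstMatch_some_lt (ks : List (List Char × List Char)) (l : List Char)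
    (v r : List Char) (h : bFirstMatch ks l = some (v, r)) : r.length < l.length := by
  induction ks with
  | nil => simp [bFirstMatch] at h
  | cons p rest ih =>
      obtain ⟨k, w⟩ := p
      by_cases hc : k ≠ [] ∧ k.isPrefixOf l
      · rw [bFirstMatch, if_pos hc] at h
        have hk : 1 ≤ k.length := List.length_pos_of_ne_nil hc.1
        have hle : k.length ≤ l.length := (List.isPrefixOf_iff_prefix.mp hc.2).length_le
        have hr : r = l.drop k.length := by
          have := h
          simp at this
          exact this.2.symm
        subst hr
        simp [List.length_drop]
        omega
      · rw [bFirstMatch, if_neg hc] at h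
        exact ih h

-- the while loop of Source B
def bScan (ks : List (List Char × List Char)) : List Char → List Char
  | [] => []
  | c :: t =>
      match h : bFirstMatch ks (c :: t) with
      | some (v, r) => v ++ bScan ks r
      | none => c :: bScan ks t
termination_by l => l.length
decreasing_by
  · exact bFirstMatch_some_lt _ _ _ _ h
  · simp

def bPairs : List (String × String) :=
  [("\\arcsin", "asin"), ("\\arccos", "acos"), ("\\arctan", "atan"),
   ("\\sinh", "sinh"), ("\\cosh", "cosh"), ("\\tanh", "tanh")]

def bKeys : List (List Char × List Char) := bPairs.map (fun p => (p.1.toList, p.2.toList))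

def handle_special_functions_py_alt (latex : String) : String :=
  String.ofList (bScan bKeys latex.toList)

-- ===== PRECONDITION & SPEC =====
def Spec_handle_special_functions_py (latex : String) (out : String) : Prop :=
  out = handle_special_functions_py_alt latex
instance (latex : String) (out : String) : Decidable (Spec_handle_special_functions_py latex out) := by
  unfold Spec_handle_special_functions_py; infer_instance

-- ===== CLAIM (what is proved, stated in full; the proofs are below) =====
def Claim_equal_handle_special_functions_py : Prop :=
  ∀ (latex : String), Dom_handle_special_functions_py latex →
    Spec_handle_special_functions_py latex (handle_special_functions_py latex)

-- ===== LEMMAS AND PROOFS =====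

-- unfolding equations for bScan
theorem bScan_nil_arg (ks : List (List Char × List Char)) : bScan ks [] = [] := by
  rw [bScan]

theorem bScan_cons_some (ks : List (List Char × List Char)) (c : Char) (t v r : List Char)
    (h : bFirstMatch ks (c :: t) = some (v, r)) : bScan ks (c :: t) = v ++ bScan ks r := by
  rw [bScan]
  split
  · rename_i v' r' heq
    rw [h] at heq
    simp_all
  · rename_i heq
    rw [h] at heq
    simp_all

theorem bScan_cons_none (ks : List (List Char × List Char)) (c : Char) (t : List Char)
    (h : bFirstMatch ks (c :: t) = none) : bScan ks (c :: t) = c :: bScan ks t := by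
  rw [bScan]
  split
  · rename_i v' r' heq
    rw [h] at heq
    simp_all
  · rfl

-- structural reformulation of one str.replace pass (PySem.Chars.replace)
def repS (old new : List Char) : List Char → List Char
  | [] => []
  | c :: t =>
      if old ≠ [] ∧ old.isPrefixOf (c :: t) then
        new ++ repS old new ((c :: t).drop old.length)
      else
        c :: repS old new t
termination_by l => l.length
decreasing_by
  · rename_i h
    have hk : 1 ≤ old.length := List.length_pos_of_ne_nil h.1
    simp [List.length_drop]
    omega
  · simp

theorem go_eq (old new : List Char) (hold : old ≠ []) :
    ∀ fuel l acc, l.length ≤ fuel →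
      PySem.Chars.replace.go old new fuel l acc = acc.reverse ++ repS old new l := by
  intro fuel
  induction fuel with
  | zero =>
      intro l acc hl
      have : l = [] := List.eq_nil_of_length_eq_zero (Nat.le_zero.mp hl)
      subst this
      simp [PySem.Chars.replace.go, repS]
  | succ n ih =>
      intro l acc hl
      cases l with
      | nil => simp [PySem.Chars.replace.go, repS]
      | cons c t =>
          by_cases hp : old.isPrefixOf (c :: t)
          · have hk : 1 ≤ old.length := List.length_pos_of_ne_nil hold
            have hdrop : ((c :: t).drop old.length).length ≤ n := by
              simp only [List.length_drop, List.length_cons] at *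
              omega
            simp only [PySem.Chars.replace.go, hp, if_pos]
            rw [ih _ _ hdrop]
            rw [repS]
            simp [hold, hp]
          · have ht : t.length ≤ n := by simp at hl; omega
            simp only [PySem.Chars.replace.go, hp, if_neg, Bool.false_eq_true, not_false_iff]
            rw [ih _ _ ht]
            rw [repS]
            simp [hp]

theorem replace_eq_repS (s old new : List Char) (hold : old ≠ []) :
    PySem.Chars.replace s old new = repS old new s := by
  unfold PySem.Chars.replace
  rw [if_neg (by simp [hold])]
  rw [go_eq old new hold s.length s [] le_rfl]
  simp

-- a replace pass whose key starts with '\' walks over a backslash-free block unchanged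
theorem repS_append_noBS (old new : List Char) (hold : old.head? = some '\\')
    (x : List Char) (hx : '\\' ∉ x) (s : List Char) :
    repS old new (x ++ s) = x ++ repS old new s := by
  induction x with
  | nil => simp
  | cons c x' ih =>
      have hc : c ≠ '\\' := by intro h; exact hx (h ▸ List.mem_cons_self ..)
      have hnp : ¬ old.isPrefixOf (c :: (x' ++ s)) := by
        intro h
        obtain ⟨tl, rfl⟩ : ∃ tl, old = '\\' :: tl := by
          cases old with
          | nil => simp at hold
          | cons o os => simp at hold; exact ⟨os, by rw [hold]⟩
        obtain ⟨r, hr⟩ := List.isPrefixOf_iff_prefix.mp h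
        simp at hr
        exact hc hr.1.symm
      rw [List.cons_append, repS, if_neg (by intro h; exact hnp h.2)]
      rw [ih (fun hm => hx (List.mem_cons_of_mem _ hm))]
      rfl

theorem bFirstMatch_none_of_head (ks : List (List Char × List Char))
    (hks : ∀ p ∈ ks, p.1.head? = some '\\') (c : Char) (hc : c ≠ '\\') (w : List Char) :
    bFirstMatch ks (c :: w) = none := by
  induction ks with
  | nil => simp [bFirstMatch]
  | cons p rest ih =>
      obtain ⟨k, v⟩ := p
      have hk := hks (k, v) (List.mem_cons_self ..)
      have hnp : ¬ (k ≠ [] ∧ k.isPrefixOf (c :: w)) := by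
        rintro ⟨hne, hp⟩
        obtain ⟨tl, rfl⟩ : ∃ tl, k = '\\' :: tl := by
          cases k with
          | nil => simp at hne
          | cons a as => simp at hk; exact ⟨as, by rw [hk]⟩
        obtain ⟨r, hr⟩ := List.isPrefixOf_iff_prefix.mp hp
        simp at hr
        exact hc hr.1.symm
      rw [bFirstMatch, if_neg hnp]
      exact ih (fun q hq => hks q (List.mem_cons_of_mem _ hq))

theorem bScan_append_noBS (ks : List (List Char × List Char))
    (hks : ∀ p ∈ ks, p.1.head? = some '\\')
    (x : List Char) (hx : '\\' ∉ x) (s : List Char) :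
    bScan ks (x ++ s) = x ++ bScan ks s := by
  induction x with
  | nil => simp
  | cons c x' ih =>
      have hc : c ≠ '\\' := by intro h; exact hx (h ▸ List.mem_cons_self ..)
      rw [List.cons_append,
        bScan_cons_none ks c _ (bFirstMatch_none_of_head ks hks c hc _),
        ih (fun hm => hx (List.mem_cons_of_mem _ hm))]
      rfl

theorem bScan_nil (s : List Char) : bScan [] s = s := by
  induction s with
  | nil => exact bScan_nil_arg []
  | cons c t ih => rw [bScan_cons_none [] c t rfl, ih]

theorem take_prefix_of_prefix_append (p v s : List Char) (h : p <+: v ++ s) :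
    p.take v.length <+: v := by
  have h1 : p.take v.length <+: v ++ s := (List.take_prefix _ _).trans h
  have h2 : p.take v.length <+: (v ++ s).take v.length :=
    List.prefix_take_iff.mpr ⟨h1, by simp⟩
  simpa using h2

theorem bFirstMatch_mem (ks : List (List Char × List Char)) (l v r : List Char)
    (h : bFirstMatch ks l = some (v, r)) :
    ∃ k, (k, v) ∈ ks ∧ k ≠ [] ∧ k.isPrefixOf l ∧ r = l.drop k.length := by
  induction ks with
  | nil => simp [bFirstMatch] at h
  | cons p rest ih =>
      obtain ⟨k, w⟩ := p
      by_cases hc : k ≠ [] ∧ k.isPrefixOf l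
      · rw [bFirstMatch, if_pos hc] at h
        have h' : w = v ∧ l.drop k.length = r := by simpa using h
        exact ⟨k, by simp [h'.1], hc.1, hc.2, h'.2.symm⟩
      · rw [bFirstMatch, if_neg hc] at h
        obtain ⟨k', h1, h2, h3, h4⟩ := ih h
        exact ⟨k', List.mem_cons_of_mem _ h1, h2, h3, h4⟩

theorem bFirstMatch_append_some (ks : List (List Char × List Char)) (l : List Char)
    (q : List Char × List Char) (x : List Char × List Char)
    (h : bFirstMatch ks l = some x) : bFirstMatch (ks ++ [q]) l = some x := by
  induction ks with
  | nil => simp [bFirstMatch] at h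
  | cons p rest ih =>
      obtain ⟨k, w⟩ := p
      by_cases hc : k ≠ [] ∧ k.isPrefixOf l
      · rw [bFirstMatch, if_pos hc] at h
        rw [List.cons_append, bFirstMatch, if_pos hc]
        exact h
      · rw [bFirstMatch, if_neg hc] at h
        rw [List.cons_append, bFirstMatch, if_neg hc]
        exact ih h

theorem bFirstMatch_append_none (ks : List (List Char × List Char)) (l : List Char)
    (q : List Char × List Char) (h : bFirstMatch ks l = none) :
    bFirstMatch (ks ++ [q]) l = bFirstMatch [q] l := by
  induction ks with
  | nil => simp
  | cons p rest ih =>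
      obtain ⟨k, w⟩ := p
      by_cases hc : k ≠ [] ∧ k.isPrefixOf l
      · rw [bFirstMatch, if_pos hc] at h; exact absurd h (by simp)
      · rw [bFirstMatch, if_neg hc] at h
        rw [List.cons_append, bFirstMatch, if_neg hc]
        exact ih h

-- the scan over the already-processed keys cannot create a fresh occurrence of a
-- pending key tail at the head of its output
theorem no_new_prefix (ks : List (List Char × List Char))
    (hks : ∀ p ∈ ks, p.1.head? = some '\\')
    (tl : List Char)
    (hsafe : ∀ j, j < tl.length → ∀ p ∈ ks, ¬ ((tl.drop j).take p.2.length <+: p.2)) :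
    ∀ n s p, s.length < n → p ≠ [] → p <:+ tl → ¬ p <+: s → ¬ p <+: bScan ks s := by
  intro n
  induction n with
  | zero => intro s p h; omega
  | succ n ih =>
      intro s p hlen hne hsuf hnp hcon
      cases s with
      | nil =>
          rw [bScan_nil_arg] at hcon
          exact hne (List.prefix_nil.mp hcon)
      | cons c t =>
          cases hfm : bFirstMatch ks (c :: t) with
          | some x =>
              obtain ⟨v, r⟩ := x
              rw [bScan_cons_some ks c t v r hfm] at hcon
              obtain ⟨k, hmem, -, -, -⟩ := bFirstMatch_mem ks _ v r hfm
              obtain ⟨u, hu⟩ := hsuf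
              have hplen : 0 < p.length := List.length_pos_of_ne_nil hne
              have hj : u.length < tl.length := by
                rw [← hu, List.length_append]; omega
              have hdrop : tl.drop u.length = p := by
                rw [← hu]; exact List.drop_left
              have := hsafe u.length hj (k, v) hmem
              rw [hdrop] at this
              exact this (take_prefix_of_prefix_append p v _ hcon)
          | none =>
              rw [bScan_cons_none ks c t hfm] at hcon
              cases p with
              | nil => exact hne rfl
              | cons p0 p' =>
                  have hpair : p0 = c ∧ p' <+: bScan ks t := by
                    obtain ⟨q, hq⟩ := hcon
                    rw [List.cons_append] at hq
                    obtain ⟨h1, h2⟩ := List.cons.inj hq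
                    exact ⟨h1, ⟨q, h2⟩⟩
                  obtain ⟨hp0, hp'⟩ := hpair
                  subst hp0
                  by_cases hpe : p' = []
                  · subst hpe
                    exact hnp ⟨t, rfl⟩
                  · have hnp' : ¬ p' <+: t := by
                      intro hpt
                      apply hnp
                      obtain ⟨q, hq⟩ := hpt
                      exact ⟨q, by rw [List.cons_append, hq]⟩
                    have hsuf' : p0 :: p' <:+ tl := hsuf
                    have hsuf'' : p' <:+ tl := by
                      obtain ⟨u, hu⟩ := hsuf'
                      exact ⟨u ++ [p0], by simpa using hu⟩
                    have ht : t.length < n := by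
                      simp only [List.length_cons] at hlen; omega
                    exact ih t p' ht hpe hsuf'' hnp' hp'

-- one more str.replace pass over the scan of the already-processed keys
-- equals the scan with the new key appended
theorem step (ks : List (List Char × List Char)) (k v : List Char)
    (hks : ∀ p ∈ ks, p.1.head? = some '\\')
    (hvs : ∀ p ∈ ks, '\\' ∉ p.2)
    (hk : k.head? = some '\\')
    (hktl : '\\' ∉ k.tail)
    (hktlne : k.tail ≠ [])
    (hsafe : ∀ j, j < k.tail.length → ∀ p ∈ ks, ¬ ((k.tail.drop j).take p.2.length <+: p.2)) :
    ∀ s, repS k v (bScan ks s) = bScan (ks ++ [(k, v)]) s := by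
  obtain ⟨tl, rfl⟩ : ∃ tl, k = '\\' :: tl := by
    cases k with
    | nil => simp at hk
    | cons a as => simp at hk; exact ⟨as, by rw [hk]⟩
  simp only [List.tail_cons] at hktl hktlne hsafe
  have main : ∀ n s, s.length < n →
      repS ('\\' :: tl) v (bScan ks s) = bScan (ks ++ [('\\' :: tl, v)]) s := by
    intro n
    induction n with
    | zero => intro s h; omega
    | succ n ih =>
        intro s hlen
        cases s with
        | nil => rw [bScan_nil_arg, bScan_nil_arg, repS]
        | cons c t =>
            cases hfm : bFirstMatch ks (c :: t) with
            | some x =>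
                obtain ⟨v', r⟩ := x
                rw [bScan_cons_some ks c t v' r hfm]
                rw [bScan_cons_some (ks ++ [('\\' :: tl, v)]) c t v' r
                  (bFirstMatch_append_some ks _ _ _ hfm)]
                obtain ⟨k', hmem, -, -, -⟩ := bFirstMatch_mem ks _ v' r hfm
                rw [repS_append_noBS _ v rfl v' (hvs (k', v') hmem) _]
                have h1 := bFirstMatch_some_lt ks _ v' r hfm
                have hr : r.length < n := by
                  simp only [List.length_cons] at h1 hlen; omega
                rw [ih r hr]
            | none =>
                by_cases hpre : ('\\' :: tl) <+: (c :: t)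
                · obtain ⟨r, hr⟩ := hpre
                  rw [List.cons_append] at hr
                  obtain ⟨hc, ht⟩ := List.cons.inj hr
                  subst hc
                  subst ht
                  rw [bScan_cons_none ks _ _ hfm]
                  rw [bScan_append_noBS ks hks tl hktl r]
                  have hfm2 : bFirstMatch (ks ++ [('\\' :: tl, v)]) ('\\' :: (tl ++ r)) =
                      some (v, r) := by
                    rw [bFirstMatch_append_none ks _ _ hfm]
                    rw [bFirstMatch, if_pos ⟨by simp,
                      List.isPrefixOf_iff_prefix.mpr ⟨r, by simp⟩⟩]
                    show some (v, (('\\' :: tl) ++ r).drop ('\\' :: tl).length) = some (v, r)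
                    rw [List.drop_left]
                  rw [bScan_cons_some _ _ _ _ _ hfm2]
                  have hrep : repS ('\\' :: tl) v ('\\' :: (tl ++ bScan ks r)) =
                      v ++ repS ('\\' :: tl) v (bScan ks r) := by
                    rw [repS, if_pos ⟨by simp,
                      List.isPrefixOf_iff_prefix.mpr ⟨bScan ks r, by simp⟩⟩]
                    congr 1
                    show repS ('\\' :: tl) v
                        ((('\\' :: tl) ++ bScan ks r).drop ('\\' :: tl).length) = _
                    rw [List.drop_left]
                  rw [hrep]
                  have hrlen : r.length < n := by
                    simp only [List.length_cons, List.length_append] at hlen; omega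
                  rw [ih r hrlen]
                · have hfm2 : bFirstMatch (ks ++ [('\\' :: tl, v)]) (c :: t) = none := by
                    rw [bFirstMatch_append_none ks _ _ hfm]
                    rw [bFirstMatch, if_neg (by
                      rintro ⟨-, hp⟩
                      exact hpre (List.isPrefixOf_iff_prefix.mp hp))]
                    rfl
                  rw [bScan_cons_none ks _ _ hfm, bScan_cons_none _ _ _ hfm2]
                  have hnopre : ¬ ('\\' :: tl) <+: (c :: bScan ks t) := by
                    intro hcp
                    obtain ⟨q, hq⟩ := hcp
                    rw [List.cons_append] at hq
                    obtain ⟨hc, htl⟩ := List.cons.inj hq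
                    subst hc
                    have htlt : ¬ tl <+: t := by
                      intro hpt
                      obtain ⟨q', hq'⟩ := hpt
                      exact hpre ⟨q', by rw [List.cons_append, hq']⟩
                    exact no_new_prefix ks hks tl hsafe (t.length + 1) t tl
                      (Nat.lt_succ_self _) hktlne List.suffix_rfl htlt ⟨q, htl⟩
                  rw [repS, if_neg (by
                    rintro ⟨-, hp⟩
                    exact hnopre (List.isPrefixOf_iff_prefix.mp hp))]
                  have htlen : t.length < n := by
                    simp only [List.length_cons] at hlen; omega
                  rw [ih t htlen]
  intro s
  exact main (s.length + 1) s (Nat.lt_succ_self _)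

-- ===== VERDICT (by name: the statement is the Claim_ definition above) =====
theorem handle_special_functions_py_spec : Claim_equal_handle_special_functions_py := by
  intro latex _
  unfold Spec_handle_special_functions_py
  apply String.toList_inj.mp
  have e1 : ("\\arcsin" : String).toList = ['\\','a','r','c','s','i','n'] := by decide
  have e2 : ("\\arccos" : String).toList = ['\\','a','r','c','c','o','s'] := by decide
  have e3 : ("\\arctan" : String).toList = ['\\','a','r','c','t','a','n'] := by decide
  have e4 : ("\\sinh" : String).toList = ['\\','s','i','n','h'] := by decide
  have e5 : ("\\cosh" : String).toList = ['\\','c','o','s','h'] := by decide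
  have e6 : ("\\tanh" : String).toList = ['\\','t','a','n','h'] := by decide
  have f1 : ("asin" : String).toList = ['a','s','i','n'] := by decide
  have f2 : ("acos" : String).toList = ['a','c','o','s'] := by decide
  have f3 : ("atan" : String).toList = ['a','t','a','n'] := by decide
  have f4 : ("sinh" : String).toList = ['s','i','n','h'] := by decide
  have f5 : ("cosh" : String).toList = ['c','o','s','h'] := by decide
  have f6 : ("tanh" : String).toList = ['t','a','n','h'] := by decide
  have hA : (handle_special_functions_py latex).toList =
      repS ['\\','t','a','n','h'] ['t','a','n','h']
        (repS ['\\','c','o','s','h'] ['c','o','s','h']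
          (repS ['\\','s','i','n','h'] ['s','i','n','h']
            (repS ['\\','a','r','c','t','a','n'] ['a','t','a','n']
              (repS ['\\','a','r','c','c','o','s'] ['a','c','o','s']
                (repS ['\\','a','r','c','s','i','n'] ['a','s','i','n']
                  latex.toList))))) := by
    simp only [handle_special_functions_py, pyFunctions, List.foldl]
    simp only [PySem.Str.toList_replace, e1, e2, e3, e4, e5, e6, f1, f2, f3, f4, f5, f6]
    rw [replace_eq_repS _ _ _ (by decide), replace_eq_repS _ _ _ (by decide),
        replace_eq_repS _ _ _ (by decide), replace_eq_repS _ _ _ (by decide),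
        replace_eq_repS _ _ _ (by decide), replace_eq_repS _ _ _ (by decide)]
  have hB : (handle_special_functions_py_alt latex).toList = bScan bKeys latex.toList := by
    simp [handle_special_functions_py_alt]
  have hbk : bKeys =
      [(['\\','a','r','c','s','i','n'], ['a','s','i','n']),
       (['\\','a','r','c','c','o','s'], ['a','c','o','s']),
       (['\\','a','r','c','t','a','n'], ['a','t','a','n']),
       (['\\','s','i','n','h'], ['s','i','n','h']),
       (['\\','c','o','s','h'], ['c','o','s','h']),
       (['\\','t','a','n','h'], ['t','a','n','h'])] := by decide
  have c1 := step [] ['\\','a','r','c','s','i','n'] ['a','s','i','n']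
    (by decide) (by decide) (by decide) (by decide) (by decide) (by decide)
  have c2 := step [(['\\','a','r','c','s','i','n'], ['a','s','i','n'])]
    ['\\','a','r','c','c','o','s'] ['a','c','o','s']
    (by decide) (by decide) (by decide) (by decide) (by decide) (by decide)
  have c3 := step [(['\\','a','r','c','s','i','n'], ['a','s','i','n']),
    (['\\','a','r','c','c','o','s'], ['a','c','o','s'])]
    ['\\','a','r','c','t','a','n'] ['a','t','a','n']
    (by decide) (by decide) (by decide) (by decide) (by decide) (by decide)
  have c4 := step [(['\\','a','r','c','s','i','n'], ['a','s','i','n']),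
    (['\\','a','r','c','c','o','s'], ['a','c','o','s']),
    (['\\','a','r','c','t','a','n'], ['a','t','a','n'])]
    ['\\','s','i','n','h'] ['s','i','n','h']
    (by decide) (by decide) (by decide) (by decide) (by decide) (by decide)
  have c5 := step [(['\\','a','r','c','s','i','n'], ['a','s','i','n']),
    (['\\','a','r','c','c','o','s'], ['a','c','o','s']),
    (['\\','a','r','c','t','a','n'], ['a','t','a','n']),
    (['\\','s','i','n','h'], ['s','i','n','h'])]
    ['\\','c','o','s','h'] ['c','o','s','h']
    (by decide) (by decide) (by decide) (by decide) (by decide) (by decide)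
  have c6 := step [(['\\','a','r','c','s','i','n'], ['a','s','i','n']),
    (['\\','a','r','c','c','o','s'], ['a','c','o','s']),
    (['\\','a','r','c','t','a','n'], ['a','t','a','n']),
    (['\\','s','i','n','h'], ['s','i','n','h']),
    (['\\','c','o','s','h'], ['c','o','s','h'])]
    ['\\','t','a','n','h'] ['t','a','n','h']
    (by decide) (by decide) (by decide) (by decide) (by decide) (by decide)
  rw [hA, hB, hbk]
  conv_lhs => rw [show latex.toList = bScan [] latex.toList from (bScan_nil _).symm]
  rw [c1]; simp only [List.nil_append]
  rw [c2]; simp only [List.cons_append, List.nil_append]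
  rw [c3]; simp only [List.cons_append, List.nil_append]
  rw [c4]; simp only [List.cons_append, List.nil_append]
  rw [c5]; simp only [List.cons_append, List.nil_append]
  rw [c6]; simp only [List.cons_append, List.nil_append]
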